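-- pv_equiv track=rewrite | github.com/eliottcassidy2000/math | 04-computation/blue_skeleton_correct.py | tiling_transpose_pairs
-- ===== SOURCE A (Python) =====
-- def tiling_transpose_pairs(n):
--     """Compute transpose-paired tiling bit indices for GS check.
--
--     Non-backbone edges (i,j) with j-i >= 2.
--     Transpose: (i,j) -> (n-1-j, n-1-i).
--     """
--     edges = []
--     for i in range(n):
--         for j in range(i+2, n):
--             edges.append((i, j))
--
--     edge_to_idx = {e: idx for idx, e in enumerate(edges)}
--
--     pairs = []
--     fixed = []
--     seen = set()
--
--     for idx, (i, j) in enumerate(edges):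
--         if idx in seen:
--             continue
--         ti, tj = n-1-j, n-1-i
--         if ti > tj:
--             ti, tj = tj, ti
--         if tj - ti < 2:
--             # Transpose lands on a backbone edge — this is a FIXED tile
--             # Actually transpose of non-backbone should be non-backbone for the staircase
--             # Wait: (i,j) -> (n-1-j, n-1-i). If n-1-j and n-1-i differ by 1, it's backbone.
--             # j-i >= 2, n-1-i - (n-1-j) = j-i >= 2. So it's ALWAYS non-backbone!
--             pass
--         if (ti, tj) == (i, j):
--             fixed.append(idx)
--             seen.add(idx)
--         elif (ti, tj) in edge_to_idx:
--             tidx = edge_to_idx[(ti, tj)]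
--             pairs.append((idx, tidx))
--             seen.add(idx)
--             seen.add(tidx)
--
--     return pairs, fixed
-- ===== SOURCE B (Python) =====
-- def tiling_transpose_pairs(n):
--     """Compute transpose-paired tiling bit indices for GS check.
--
--     Single pass over non-backbone edges (i,j), j-i >= 2, with a running
--     index counter; the transpose partner's index comes from the closed
--     form for the lexicographic position of an edge, so no edges list,
--     dict or seen set is ever built.
--     """
--     pairs = []
--     fixed = []
--     idx = 0
--     for i in range(n):
--         for j in range(i + 2, n):
--             s = i + j
--             if s == n - 1:
--                 fixed.append(idx)
--             elif s < n - 1: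
--                 ti, tj = n - 1 - j, n - 1 - i
--                 tidx = ti * (n - 2) - ti * (ti - 1) // 2 + (tj - ti - 2)
--                 pairs.append((idx, tidx))
--             idx += 1
--     return pairs, fixed
-- ===== Notes on version B (the rewrite author's own statement) =====
-- stated objective: faster
-- what changed: B makes a single pass over the (i,j) loop nest with a running edge counter and computes the transpose partner's index by the closed form base(ti)+ (tj-ti-2) with base(c)=c*(n-2)-c*(c-1)//2, using that an edge is fixed iff i+j==n-1 and precedes its transpose iff i+j<n-1; it never builds A's edges list, edge-to-index dict or seen set.
import Mathlib
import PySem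

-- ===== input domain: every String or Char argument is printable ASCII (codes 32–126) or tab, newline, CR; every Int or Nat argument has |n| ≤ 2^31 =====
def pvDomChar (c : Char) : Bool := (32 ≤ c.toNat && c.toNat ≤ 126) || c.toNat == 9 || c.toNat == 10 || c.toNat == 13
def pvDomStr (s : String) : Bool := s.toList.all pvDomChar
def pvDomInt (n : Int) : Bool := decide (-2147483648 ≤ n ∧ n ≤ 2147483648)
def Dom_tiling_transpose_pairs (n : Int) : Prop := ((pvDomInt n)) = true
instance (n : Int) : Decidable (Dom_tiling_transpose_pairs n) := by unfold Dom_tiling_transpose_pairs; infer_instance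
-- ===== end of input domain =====

-- B replaces A's edges list / edge-to-index dict / seen set by one pass with a running
-- counter and a closed-form index for the transpose partner (objective: faster, constant factor).

-- ===== PORT A =====
-- the 'edges' list built by A's nested loop
def pyA_edges (n : Int) : List (Int × Int) :=
  (PySem.List.pyRange 0 n 1).foldl (fun acc i =>
    (PySem.List.pyRange (i + 2) n 1).foldl (fun acc2 j => acc2 ++ [(i, j)]) acc) []

-- 'edge_to_idx = {e: idx for idx, e in enumerate(edges)}'
def pyA_dict (n : Int) : PySem.Dict (Int × Int) Int :=
  (PySem.List.enumerate (pyA_edges n)).foldl (fun d p => d.insert p.2 p.1) PySem.Dict.empty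

-- the body of A's main 'for idx, (i, j) in enumerate(edges)' loop; state = (pairs, fixed, seen)
def pyA_step (n : Int) (d : PySem.Dict (Int × Int) Int)
    (st : List (Int × Int) × List Int × PySem.Set Int) (p : Int × (Int × Int)) :
    List (Int × Int) × List Int × PySem.Set Int :=
  let idx := p.1; let i := p.2.1; let j := p.2.2
  if PySem.Set.contains st.2.2 idx then st
  else
    let t0 := (n - 1 - j, n - 1 - i)
    let t := if t0.1 > t0.2 then (t0.2, t0.1) else t0
    -- 'if tj - ti < 2: pass' has no effect and is omitted
    if t = (i, j) then (st.1, st.2.1 ++ [idx], PySem.Set.add st.2.2 idx)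
    else
      match d.get? t with
      | some tidx => (st.1 ++ [(idx, tidx)], st.2.1, PySem.Set.add (PySem.Set.add st.2.2 idx) tidx)
      | none => st

def tiling_transpose_pairs (n : Int) : (List (Int × Int)) × List Int :=
  let r := (PySem.List.enumerate (pyA_edges n)).foldl (pyA_step n (pyA_dict n))
    ([], [], PySem.Set.empty)
  (r.1, r.2.1)

-- ===== PORT B =====
-- the body of B's inner loop; state = (pairs, fixed, idx)
def pyB_step (n i : Int) (st : List (Int × Int) × List Int × Int) (j : Int) :
    List (Int × Int) × List Int × Int :=
  let idx := st.2.2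
  let s := i + j
  if s = n - 1 then (st.1, st.2.1 ++ [idx], idx + 1)
  else if s < n - 1 then
    let ti := n - 1 - j
    let tj := n - 1 - i
    let tidx := ti * (n - 2) - PySem.Int.floordiv (ti * (ti - 1)) 2 + (tj - ti - 2)
    (st.1 ++ [(idx, tidx)], st.2.1, idx + 1)
  else (st.1, st.2.1, idx + 1)

def tiling_transpose_pairs_alt (n : Int) : (List (Int × Int)) × List Int :=
  let r := (PySem.List.pyRange 0 n 1).foldl
    (fun st i => (PySem.List.pyRange (i + 2) n 1).foldl (pyB_step n i) st) ([], [], 0)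
  (r.1, r.2.1)

-- ===== PRECONDITION & SPEC =====
def Spec_tiling_transpose_pairs (n : Int) (out : (List (Int × Int)) × List Int) : Prop := out = tiling_transpose_pairs_alt n
instance (n : Int) (out : (List (Int × Int)) × List Int) : Decidable (Spec_tiling_transpose_pairs n out) := by unfold Spec_tiling_transpose_pairs; infer_instance

-- ===== CLAIM (what is proved, stated in full; the proofs are below) =====
def Claim_equal_tiling_transpose_pairs : Prop := ∀ (n : Int), Dom_tiling_transpose_pairs n → Spec_tiling_transpose_pairs n (tiling_transpose_pairs n)

-- ===== LEMMAS AND PROOFS =====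

-- the canonical edge list, its lexicographic index, and the transpose map
def tpRow (n i : Int) : List (Int × Int) := (PySem.List.pyRange (i + 2) n 1).map (fun j => (i, j))
def tpE (n : Int) : List (Int × Int) := (PySem.List.pyRange 0 n 1).flatMap (tpRow n)
def tpIdx (n : Int) (e : Int × Int) : Int :=
  e.1 * (n - 2) - PySem.Int.floordiv (e.1 * (e.1 - 1)) 2 + (e.2 - e.1 - 2)
def tpT (n : Int) (e : Int × Int) : Int × Int := (n - 1 - e.2, n - 1 - e.1)
def tpPairs (n : Int) (l : List (Int × Int)) : List (Int × Int) :=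
  l.filterMap (fun e => if e.1 + e.2 < n - 1 then some (tpIdx n e, tpIdx n (tpT n e)) else none)
def tpFixed (n : Int) (l : List (Int × Int)) : List Int :=
  l.filterMap (fun e => if e.1 + e.2 = n - 1 then some (tpIdx n e) else none)
def tpSeen (n : Int) (Q : List (Int × Int)) (x : Int) : Prop :=
  (∃ e ∈ Q, e.1 + e.2 ≤ n - 1 ∧ x = tpIdx n e) ∨
  (∃ e ∈ Q, e.1 + e.2 < n - 1 ∧ x = tpIdx n (tpT n e))

lemma tp_two_mul_q (a : Int) :
    2 * PySem.Int.floordiv (a * (a - 1)) 2 = a * (a - 1) := by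
  have hev : (2 : Int) ∣ a * (a - 1) := by
    rcases Int.even_or_odd a with h | h
    · exact Dvd.dvd.mul_right h.two_dvd _
    · have : Even (a - 1) := by
        rcases h with ⟨k, hk⟩; exact ⟨k, by omega⟩
      exact Dvd.dvd.mul_left this.two_dvd _
  rw [PySem.Int.floordiv_eq_ediv_of_pos (by norm_num)]
  exact Int.mul_ediv_cancel' hev

lemma tp_mem_E {n : Int} {e : Int × Int} :
    e ∈ tpE n ↔ 0 ≤ e.1 ∧ e.1 + 2 ≤ e.2 ∧ e.2 < n := by
  rcases e with ⟨a, b⟩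
  simp only [tpE, tpRow, List.mem_flatMap, List.mem_map, PySem.List.mem_pyRange_one,
    Prod.mk.injEq]
  constructor
  · rintro ⟨i, ⟨hi0, hin⟩, j, ⟨hj1, hj2⟩, rfl, rfl⟩
    omega
  · rintro ⟨h0, h1, h2⟩
    exact ⟨a, ⟨h0, by omega⟩, b, ⟨by omega, h2⟩, rfl, rfl⟩

def tpBase (n c : Int) : Int := c * (n - 2) - PySem.Int.floordiv (c * (c - 1)) 2
def tpGrow (n : Int) (m : Nat) : List (Int × Int) :=
  (List.range m).flatMap (fun (k : Nat) => tpRow n (k : Int))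

lemma tpGrow_eq (n : Int) (m : Nat) :
    tpGrow n m = (List.range m).flatMap (fun a : Nat => tpRow n (a : Int)) := rfl

lemma tp_row_enum (n i b : Int) : ∀ (t : Nat) (a s : Int), t = (b - a).toNat →
    PySem.List.enumerate ((PySem.List.pyRange a b 1).map (fun j => (i, j))) s
      = (PySem.List.pyRange a b 1).map (fun j => (s + (j - a), (i, j))) := by
  intro t
  induction t with
  | zero =>
    intro a s h
    rw [PySem.List.pyRange_one_eq_nil (by omega)]
    simp [PySem.List.enumerate_nil]
  | succ t ih =>
    intro a s h
    by_cases hab : a < b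
    · rw [PySem.List.pyRange_one_cons hab]
      simp only [List.map_cons, PySem.List.enumerate_cons]
      rw [ih (a + 1) (s + 1) (by omega)]
      refine congrArg₂ _ (by simp) ?_
      refine List.map_congr_left (fun j hj => ?_)
      have : s + 1 + (j - (a + 1)) = s + (j - a) := by ring
      rw [this]
    · exact absurd h (by omega)

lemma tp_grow (n : Int) : ∀ (m : Nat), (m : Int) ≤ n - 2 →
    ((tpGrow n m).length : Int) = tpBase n (m : Int) ∧
    PySem.List.enumerate (tpGrow n m) 0 = (tpGrow n m).map (fun e => (tpIdx n e, e)) := by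
  intro m
  induction m with
  | zero =>
    intro _
    constructor
    · have h0 : PySem.Int.floordiv (0 * (0 - 1) : Int) 2 = 0 := by decide
      simp [tpGrow, tpBase, h0]
    · simp [tpGrow, PySem.List.enumerate_nil]
  | succ m ih =>
    intro h
    obtain ⟨ihlen, ihenum⟩ := ih (by push_cast; omega)
    have hg : tpGrow n (m + 1) = tpGrow n m ++ tpRow n (m : Int) := by
      simp [tpGrow, List.range_succ]
    have hrowlen : ((tpRow n (m : Int)).length : Int) = n - (m : Int) - 2 := by
      simp [tpRow, PySem.List.length_pyRange_one]
      push_cast at h ⊢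
      omega
    have hbase : tpBase n ((m : Int) + 1) = tpBase n (m : Int) + (n - (m : Int) - 2) := by
      have h1 := tp_two_mul_q ((m : Int) + 1)
      have h2 := tp_two_mul_q (m : Int)
      unfold tpBase
      linarith
    constructor
    · rw [hg]
      simp only [List.length_append]
      push_cast
      push_cast at ihlen
      omega
    · rw [hg, PySem.List.enumerate_append, ihenum, List.map_append]
      refine congrArg₂ _ rfl ?_
      unfold tpRow
      rw [tp_row_enum n (m : Int) n (n - ((m : Int) + 2)).toNat ((m : Int) + 2) _ rfl,
        List.map_map]
      refine List.map_congr_left (fun j hj => ?_)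
      rw [PySem.List.mem_pyRange_one] at hj
      refine congrArg₂ _ ?_ rfl
      show 0 + ((tpGrow n m).length : Int) + (j - ((m : Int) + 2)) = tpIdx n ((m : Int), j)
      rw [ihlen]
      unfold tpBase tpIdx
      ring

lemma tp_E_eq_grow (n : Int) : tpE n = tpGrow n (n - 2).toNat := by
  unfold tpE
  rw [PySem.List.pyRange_one 0 n, List.flatMap_map]
  simp only [zero_add]
  by_cases h2 : 2 < n
  · have hnn : (n - 0).toNat = (n - 2).toNat + 1 + 1 := by omega
    rw [hnn, List.range_succ, List.range_succ]
    simp only [List.flatMap_append, List.flatMap_cons, List.flatMap_nil]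
    have hr1 : tpRow n (((n - 2).toNat : Nat) : Int) = [] := by
      unfold tpRow
      rw [PySem.List.pyRange_one_eq_nil (by omega)]
      simp
    have hr2 : tpRow n ((((n - 2).toNat + 1 : Nat)) : Int) = [] := by
      unfold tpRow
      rw [PySem.List.pyRange_one_eq_nil (by push_cast; omega)]
      simp
    rw [hr1, hr2]
    simp only [List.append_nil]
    rw [tpGrow_eq]
  · have hz : (n - 2).toNat = 0 := by omega
    rw [hz]
    simp only [tpGrow, List.range_zero, List.flatMap_nil]
    refine List.flatMap_eq_nil_iff.mpr (fun k hk => ?_)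
    unfold tpRow
    rw [PySem.List.pyRange_one_eq_nil (by omega)]
    simp

lemma tp_enum_E (n : Int) :
    PySem.List.enumerate (tpE n) 0 = (tpE n).map (fun e => (tpIdx n e, e)) := by
  rw [tp_E_eq_grow]
  by_cases h : 2 ≤ n
  · exact (tp_grow n (n - 2).toNat (by omega)).2
  · have hz : (n - 2).toNat = 0 := by omega
    rw [hz]
    simp [tpGrow, PySem.List.enumerate_nil]

lemma tp_idx_pos {n : Int} {k : Nat} (hk : k < (tpE n).length) :
    tpIdx n ((tpE n)[k]) = (k : Int) := by
  have hk' : k < (PySem.List.enumerate (tpE n) 0).length := by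
    rwa [PySem.List.length_enumerate]
  have h1 := PySem.List.getElem_enumerate (tpE n) 0 k hk'
  have h2 : (PySem.List.enumerate (tpE n) 0)[k]'hk'
      = ((tpE n).map (fun e => (tpIdx n e, e)))[k]'(by simpa using hk) := by
    congr 1
    exact tp_enum_E n
  rw [h1, List.getElem_map] at h2
  have := congrArg Prod.fst h2
  simp at this
  omega

lemma tp_inj {n : Int} {e f : Int × Int} (he : e ∈ tpE n) (hf : f ∈ tpE n)
    (h : tpIdx n e = tpIdx n f) : e = f := by
  obtain ⟨p, hp, rfl⟩ := List.mem_iff_getElem.1 he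
  obtain ⟨q, hq, rfl⟩ := List.mem_iff_getElem.1 hf
  rw [tp_idx_pos hp, tp_idx_pos hq] at h
  have : p = q := by omega
  subst this
  rfl

lemma tp_mono {n : Int} {e f : Int × Int} (he : e ∈ tpE n) (hf : f ∈ tpE n)
    (h : e.1 < f.1) : tpIdx n e < tpIdx n f := by
  rw [tp_mem_E] at he hf
  have hq1 := tp_two_mul_q e.1
  have hq2 := tp_two_mul_q f.1
  unfold tpIdx
  nlinarith [mul_nonneg (show (0:Int) ≤ f.1 - e.1 - 1 by omega)
    (show (0:Int) ≤ 2 * n - 4 - f.1 - e.1 by omega)]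

lemma tp_nodup (n : Int) : (tpE n).Nodup := by
  rw [List.nodup_iff_injective_getElem]
  rintro ⟨p, hp⟩ ⟨q, hq⟩ h
  simp only at h
  have h1 : tpIdx n ((tpE n)[p]'hp) = (p : Int) := tp_idx_pos hp
  have h2 : tpIdx n ((tpE n)[q]'hq) = (q : Int) := tp_idx_pos hq
  rw [h] at h1
  rw [h2] at h1
  simpa using (by omega : p = q)

lemma tp_T_invol (n : Int) (e : Int × Int) : tpT n (tpT n e) = e := by
  simp [tpT]

lemma tp_mem_prefix {n : Int} {Q R : List (Int × Int)} (hE : tpE n = Q ++ R)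
    {x : Int × Int} : x ∈ Q ↔ x ∈ tpE n ∧ tpIdx n x < (Q.length : Int) := by
  constructor
  · intro hx
    obtain ⟨p, hp, hQp⟩ := List.mem_iff_getElem.1 hx
    have hpE : p < (tpE n).length := by
      rw [hE, List.length_append]; omega
    have hEp : (tpE n)[p]'hpE = x := by
      rw [List.getElem_of_eq hE hpE, List.getElem_append_left hp]
      exact hQp
    refine ⟨hEp ▸ List.getElem_mem hpE, ?_⟩
    rw [← hEp, tp_idx_pos hpE]
    exact_mod_cast hp
  · rintro ⟨hmem, hlt⟩
    obtain ⟨p, hp, hEp⟩ := List.mem_iff_getElem.1 hmem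
    rw [← hEp, tp_idx_pos hp] at hlt
    have hpQ : p < Q.length := by exact_mod_cast hlt
    have : (tpE n)[p]'hp = Q[p]'hpQ := by
      rw [List.getElem_of_eq hE hp]
      exact List.getElem_append_left hpQ
    rw [← hEp, this]
    exact List.getElem_mem hpQ

lemma tp_idx_at {n : Int} {Q R : List (Int × Int)} {e : Int × Int}
    (hE : tpE n = Q ++ e :: R) : tpIdx n e = (Q.length : Int) := by
  have hp : Q.length < (tpE n).length := by
    rw [hE, List.length_append]; simp
  have : (tpE n)[Q.length]'hp = e := by
    rw [List.getElem_of_eq hE hp, List.getElem_append_right (Nat.le_refl _)]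
    simp
  rw [← this, tp_idx_pos hp]

lemma tp_T_mem {n : Int} {e : Int × Int} (he : e ∈ tpE n) : tpT n e ∈ tpE n := by
  rw [tp_mem_E] at he ⊢
  simp only [tpT]
  omega

lemma tp_seen_iff {n : Int} {Q R : List (Int × Int)} {e : Int × Int}
    (hE : tpE n = Q ++ e :: R) : tpSeen n Q (tpIdx n e) ↔ n - 1 < e.1 + e.2 := by
  have he : e ∈ tpE n := by rw [hE]; simp
  have hbe := tp_mem_E.1 he
  have hidx : tpIdx n e = (Q.length : Int) := tp_idx_at hE
  constructor
  · rintro (⟨f, hfQ, hsum, hx⟩ | ⟨f, hfQ, hsum, hx⟩)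
    · have hf := (tp_mem_prefix hE).1 hfQ
      have := tp_inj he hf.1 hx
      subst this
      omega
    · have hf := (tp_mem_prefix hE).1 hfQ
      have hTf : tpT n f ∈ tpE n := tp_T_mem hf.1
      have hfe : tpT n f = e := tp_inj hTf he (by rw [← hx])
      have hc1 := congrArg Prod.fst hfe
      have hc2 := congrArg Prod.snd hfe
      simp only [tpT] at hc1 hc2
      omega
  · intro hgt
    right
    refine ⟨tpT n e, ?_, by simp [tpT]; omega, by rw [tp_T_invol]⟩
    rw [tp_mem_prefix hE]
    refine ⟨tp_T_mem he, ?_⟩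
    rw [← hidx]
    exact tp_mono (tp_T_mem he) he (by simp [tpT]; omega)

lemma tp_edges_eq (n : Int) : pyA_edges n = tpE n := by
  unfold pyA_edges tpE
  refine Eq.trans (PySem.List.foldl_congr_mem _ _ (fun acc i => acc ++ tpRow n i) _
    (fun acc i _ => PySem.List.foldl_append_singleton_eq_map _ _ _)) ?_
  rw [PySem.List.foldl_append_eq_flatMap]
  simp

lemma tp_dict_get {n : Int} {e : Int × Int} (he : e ∈ tpE n) :
    (pyA_dict n).get? e = some (tpIdx n e) := by
  unfold pyA_dict
  rw [tp_edges_eq]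
  have hnd : ((PySem.List.enumerate (tpE n) 0).map (fun p => p.2)).Nodup := by
    rw [PySem.List.map_snd_enumerate]
    exact tp_nodup n
  have hitems := PySem.Dict.items_foldl_insert_fresh (PySem.List.enumerate (tpE n) 0)
    (fun p => p.2) (fun p => p.1) PySem.Dict.empty
    (fun a _ => PySem.Dict.contains_empty a.2) hnd
  have hkeys : ((PySem.List.enumerate (tpE n) 0).foldl (fun d p => d.insert p.2 p.1)
      PySem.Dict.empty).keys.Nodup :=
    PySem.Dict.nodup_keys_foldl_insert_key (PySem.List.enumerate (tpE n) 0)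
      (fun (p : Int × (Int × Int)) => p.2) (fun _ p => p.1) PySem.Dict.empty
      PySem.Dict.nodup_keys_empty
  refine PySem.Dict.get?_of_mem_items _ ?_ hkeys
  rw [hitems, tp_enum_E n, List.map_map]
  have : PySem.Dict.empty.items = ([] : List ((Int × Int) × Int)) := rfl
  rw [this, List.nil_append]
  exact List.mem_map.2 ⟨e, he, rfl⟩

lemma tpSeen_append (n : Int) (Q : List (Int × Int)) (e : Int × Int) (x : Int) :
    tpSeen n (Q ++ [e]) x ↔ tpSeen n Q x ∨ (e.1 + e.2 ≤ n - 1 ∧ x = tpIdx n e) ∨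
      (e.1 + e.2 < n - 1 ∧ x = tpIdx n (tpT n e)) := by
  unfold tpSeen
  simp only [List.mem_append, List.mem_singleton]
  constructor
  · rintro (⟨f, hf | rfl, hs, hx⟩ | ⟨f, hf | rfl, hs, hx⟩)
    · exact Or.inl (Or.inl ⟨f, hf, hs, hx⟩)
    · exact Or.inr (Or.inl ⟨hs, hx⟩)
    · exact Or.inl (Or.inr ⟨f, hf, hs, hx⟩)
    · exact Or.inr (Or.inr ⟨hs, hx⟩)
  · rintro ((⟨f, hf, hs, hx⟩ | ⟨f, hf, hs, hx⟩) | ⟨hs, hx⟩ | ⟨hs, hx⟩)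
    · exact Or.inl ⟨f, Or.inl hf, hs, hx⟩
    · exact Or.inr ⟨f, Or.inl hf, hs, hx⟩
    · exact Or.inl ⟨e, Or.inr rfl, hs, hx⟩
    · exact Or.inr ⟨e, Or.inr rfl, hs, hx⟩

lemma tp_A_loop {n : Int} (R : List (Int × Int)) :
    ∀ (Q : List (Int × Int)) (P : List (Int × Int)) (F : List Int) (seen : PySem.Set Int),
    tpE n = Q ++ R → (∀ x : Int, x ∈ seen ↔ tpSeen n Q x) →
    (R.foldl (fun st p => pyA_step n (pyA_dict n) st (tpIdx n p, p)) (P, F, seen)).1 = P ++ tpPairs n R ∧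
    (R.foldl (fun st p => pyA_step n (pyA_dict n) st (tpIdx n p, p)) (P, F, seen)).2.1 = F ++ tpFixed n R := by
  induction R with
  | nil =>
    intro Q P F seen hE hseen
    simp [tpPairs, tpFixed]
  | cons e R ih =>
    intro Q P F seen hE hseen
    have he : e ∈ tpE n := by rw [hE]; simp
    have hb := tp_mem_E.1 he
    have hE' : tpE n = (Q ++ [e]) ++ R := by rw [hE]; simp
    have hseeniff := tp_seen_iff hE
    simp only [List.foldl_cons]
    by_cases hgt : n - 1 < e.1 + e.2
    · -- idx already seen: the step is a no-op
      have hc : PySem.Set.contains seen (tpIdx n e) = true :=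
        (PySem.Set.contains_iff _ _).2 ((hseen _).2 (hseeniff.2 hgt))
      have hstep : pyA_step n (pyA_dict n) (P, F, seen) (tpIdx n e, e) = (P, F, seen) := by
        simp only [pyA_step, hc]
        simp
      rw [hstep]
      have hseen' : ∀ x : Int, x ∈ seen ↔ tpSeen n (Q ++ [e]) x := by
        intro x
        rw [hseen x, tpSeen_append]
        constructor
        · exact Or.inl
        · rintro (h | ⟨hs, _⟩ | ⟨hs, _⟩)
          · exact h
          · omega
          · omega
      obtain ⟨ih1, ih2⟩ := ih (Q ++ [e]) P F seen hE' hseen'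
      refine ⟨?_, ?_⟩
      · rw [ih1]
        have : tpPairs n (e :: R) = tpPairs n R := by
          simp [tpPairs, if_neg (show ¬ e.1 + e.2 < n - 1 by omega)]
        rw [this]
      · rw [ih2]
        have : tpFixed n (e :: R) = tpFixed n R := by
          simp [tpFixed, if_neg (show ¬ e.1 + e.2 = n - 1 by omega)]
        rw [this]
    · have hc : PySem.Set.contains seen (tpIdx n e) = false := by
        rw [← Bool.not_eq_true]
        intro hc
        exact hgt (hseeniff.1 ((hseen _).1 ((PySem.Set.contains_iff _ _).1 hc)))
      by_cases heq : e.1 + e.2 = n - 1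
      · -- fixed tile
        have ht : ((n - 1 - e.2, n - 1 - e.1) : Int × Int) = (e.1, e.2) := by
          refine Prod.ext ?_ ?_ <;> simp <;> omega
        have hstep : pyA_step n (pyA_dict n) (P, F, seen) (tpIdx n e, e)
            = (P, F ++ [tpIdx n e], PySem.Set.add seen (tpIdx n e)) := by
          simp only [pyA_step, hc]
          simp only [Bool.false_eq_true, if_false]
          rw [if_neg (show ¬ (n - 1 - e.2 > n - 1 - e.1) by omega)]
          rw [if_pos ht]
        rw [hstep]
        have hseen' : ∀ x : Int, x ∈ PySem.Set.add seen (tpIdx n e) ↔ tpSeen n (Q ++ [e]) x := by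
          intro x
          rw [PySem.Set.mem_add, hseen x, tpSeen_append]
          constructor
          · rintro (h | rfl)
            · exact Or.inl h
            · exact Or.inr (Or.inl ⟨by omega, rfl⟩)
          · rintro (h | ⟨_, rfl⟩ | ⟨hs, _⟩)
            · exact Or.inl h
            · exact Or.inr rfl
            · omega
        obtain ⟨ih1, ih2⟩ := ih (Q ++ [e]) P (F ++ [tpIdx n e]) _ hE' hseen'
        refine ⟨?_, ?_⟩
        · rw [ih1]
          have : tpPairs n (e :: R) = tpPairs n R := by
            simp [tpPairs, if_neg (show ¬ e.1 + e.2 < n - 1 by omega)]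
          rw [this]
        · rw [ih2]
          have : tpFixed n (e :: R) = tpIdx n e :: tpFixed n R := by
            simp [tpFixed, if_pos heq]
          rw [this, List.append_assoc]
          rfl
      · -- paired tile
        have hlt : e.1 + e.2 < n - 1 := by omega
        have hTmem := tp_T_mem he
        have hget : (pyA_dict n).get? (n - 1 - e.2, n - 1 - e.1) = some (tpIdx n (tpT n e)) :=
          tp_dict_get hTmem
        have hstep : pyA_step n (pyA_dict n) (P, F, seen) (tpIdx n e, e)
            = (P ++ [(tpIdx n e, tpIdx n (tpT n e))], F,
               PySem.Set.add (PySem.Set.add seen (tpIdx n e)) (tpIdx n (tpT n e))) := by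
          simp only [pyA_step, hc]
          simp only [Bool.false_eq_true, if_false]
          rw [if_neg (show ¬ (n - 1 - e.2 > n - 1 - e.1) by omega)]
          rw [if_neg (show ((n - 1 - e.2, n - 1 - e.1) : Int × Int) ≠ (e.1, e.2) by
            intro hcontra
            rw [Prod.mk.injEq] at hcontra
            omega)]
          rw [hget]
        rw [hstep]
        have hseen' : ∀ x : Int,
            x ∈ PySem.Set.add (PySem.Set.add seen (tpIdx n e)) (tpIdx n (tpT n e)) ↔
              tpSeen n (Q ++ [e]) x := by
          intro x
          rw [PySem.Set.mem_add, PySem.Set.mem_add, hseen x, tpSeen_append]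
          constructor
          · rintro ((h | rfl) | rfl)
            · exact Or.inl h
            · exact Or.inr (Or.inl ⟨by omega, rfl⟩)
            · exact Or.inr (Or.inr ⟨hlt, rfl⟩)
          · rintro (h | ⟨_, rfl⟩ | ⟨_, rfl⟩)
            · exact Or.inl (Or.inl h)
            · exact Or.inl (Or.inr rfl)
            · exact Or.inr rfl
        obtain ⟨ih1, ih2⟩ := ih (Q ++ [e]) (P ++ [(tpIdx n e, tpIdx n (tpT n e))]) F _ hE' hseen'
        refine ⟨?_, ?_⟩
        · rw [ih1]
          have : tpPairs n (e :: R) = (tpIdx n e, tpIdx n (tpT n e)) :: tpPairs n R := by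
            simp [tpPairs, if_pos hlt]
          rw [this, List.append_assoc]
          rfl
        · rw [ih2]
          have : tpFixed n (e :: R) = tpFixed n R := by
            simp [tpFixed, if_neg heq]
          rw [this]

lemma tp_B_loop {n : Int} (l : List (Int × Int)) :
    ∀ (P : List (Int × Int)) (F : List Int) (c : Int),
    l.foldl (fun st e => pyB_step n e.1 st e.2) (P, F, c) =
      (P ++ (PySem.List.enumerate l c).filterMap
          (fun p => if p.2.1 + p.2.2 = n - 1 then none
            else if p.2.1 + p.2.2 < n - 1 then some (p.1, tpIdx n (tpT n p.2)) else none),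
       F ++ (PySem.List.enumerate l c).filterMap
          (fun p => if p.2.1 + p.2.2 = n - 1 then some p.1 else none),
       c + l.length) := by
  induction l with
  | nil =>
    intro P F c
    simp [PySem.List.enumerate_nil]
  | cons e l ih =>
    intro P F c
    simp only [List.foldl_cons, PySem.List.enumerate_cons, List.filterMap_cons]
    have hstep : pyB_step n e.1 (P, F, c) e.2 =
        (if e.1 + e.2 = n - 1 then (P, F ++ [c], c + 1)
         else if e.1 + e.2 < n - 1 then (P ++ [(c, tpIdx n (tpT n e))], F, c + 1)
         else (P, F, c + 1)) := by
      simp only [pyB_step]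
      split_ifs <;> rfl
    rw [hstep]
    by_cases h1 : e.1 + e.2 = n - 1
    · rw [if_pos h1, ih]
      refine Prod.ext ?_ (Prod.ext ?_ ?_) <;> simp [h1] <;> push_cast <;> ring
    · rw [if_neg h1]
      by_cases h2 : e.1 + e.2 < n - 1
      · rw [if_pos h2, ih]
        refine Prod.ext ?_ (Prod.ext ?_ ?_) <;> simp [h1, h2] <;> push_cast <;> ring
      · rw [if_neg h2, ih]
        refine Prod.ext ?_ (Prod.ext ?_ ?_) <;> simp [h1, h2] <;> push_cast <;> ring

lemma tp_foldl_flatMap {α β γ : Type} (g : α → List β) (f : γ → β → γ) :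
    ∀ (l : List α) (init : γ),
    (l.flatMap g).foldl f init = l.foldl (fun acc x => (g x).foldl f acc) init := by
  intro l
  induction l with
  | nil => intro init; simp
  | cons x l ih => intro init; simp [List.foldl_append, ih]

lemma tp_A_eq (n : Int) : tiling_transpose_pairs n = (tpPairs n (tpE n), tpFixed n (tpE n)) := by
  unfold tiling_transpose_pairs
  rw [tp_edges_eq, tp_enum_E, List.foldl_map]
  obtain ⟨h1, h2⟩ := tp_A_loop (n := n) (tpE n) [] [] [] PySem.Set.empty rfl
    (fun x => by simp [tpSeen, PySem.Set.empty])
  refine Prod.ext ?_ ?_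
  · simpa using h1
  · simpa using h2

lemma tp_B_eq (n : Int) : tiling_transpose_pairs_alt n = (tpPairs n (tpE n), tpFixed n (tpE n)) := by
  unfold tiling_transpose_pairs_alt
  have hflat : (PySem.List.pyRange 0 n 1).foldl
      (fun st i => (PySem.List.pyRange (i + 2) n 1).foldl (pyB_step n i) st)
      (([], [], 0) : List (Int × Int) × List Int × Int)
      = (tpE n).foldl (fun st e => pyB_step n e.1 st e.2) ([], [], 0) := by
    unfold tpE
    rw [tp_foldl_flatMap]
    refine (PySem.List.foldl_congr_mem _ _ _ _ (fun acc i _ => ?_)).symm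
    unfold tpRow
    rw [List.foldl_map]
  rw [hflat, tp_B_loop, tp_enum_E, List.filterMap_map, List.filterMap_map]
  refine Prod.ext ?_ ?_
  · simp only [tpPairs]
    show [] ++ _ = _
    rw [List.nil_append]
    refine List.filterMap_congr (fun e he => ?_)
    simp only [Function.comp]
    by_cases h1 : e.1 + e.2 = n - 1
    · rw [if_pos h1, if_neg (by omega)]
    · rw [if_neg h1]
  · simp only [tpFixed]
    show [] ++ _ = _
    rw [List.nil_append]
    rfl

-- ===== VERDICT (by name: the statement is the Claim_ definition above) =====
theorem tiling_transpose_pairs_spec : Claim_equal_tiling_transpose_pairs := by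
  intro n _
  unfold Spec_tiling_transpose_pairs
  rw [tp_A_eq, tp_B_eq]
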